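-- pv_equiv track=rewrite | github.com/ImperialCollegeLondon/Faraday-liionsden | parsing_engines/parsing_engines_base.py | get_parsed_columns
-- ===== SOURCE A (Python) =====
-- def get_parsed_columns(file_columns, parser_columns, col_mapping):
--     """Get the columns that will be parsed from the file.
--     Uses col_mapping to determine the mapping between the file columns and the standard
--     columns if they are not already in the standard format. Returns a subset of
--     parser_columns that are either in the file_column list or for which there is a
--     mapping from a file_column value in col_mapping.
--
--     Args:
--         file_columns: List of column headings as in the file.
--         parser_columns: List of columns defined in the Parser that should be parsed.
--         col_mapping: Mapping of {"file column name": "standard column name"}.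
--
--     Returns:
--         Tuple of lists of columns to parse and the corresponding header columns.
--     """
--     parsed_columns = []
--     header_columns = []
--     for col in parser_columns:
--         if col in file_columns:
--             parsed_columns.append(col)
--             header_columns.append(col)
--         else:
--             for file_col, parser_col in col_mapping.items():
--                 if parser_col == col and file_col in file_columns:
--                     parsed_columns.append(col)
--                     header_columns.append(file_col)
--                     break
--     return (parsed_columns, header_columns)
-- ===== SOURCE B (Python) =====
-- def get_parsed_columns(file_columns, parser_columns, col_mapping):
--     """Faster re-implementation: set membership + one precomputed reverse map
--     parser_col -> first mapped file_col present in the file; single pass over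
--     parser_columns with no inner scan."""
--     present = set(file_columns)
--     rev = {}
--     for file_col, parser_col in col_mapping.items():
--         if parser_col not in rev and file_col in present:
--             rev[parser_col] = file_col
--     parsed_columns = []
--     header_columns = []
--     for col in parser_columns:
--         if col in present:
--             parsed_columns.append(col)
--             header_columns.append(col)
--         elif col in rev:
--             parsed_columns.append(col)
--             header_columns.append(rev[col])
--     return (parsed_columns, header_columns)
-- ===== Notes on version B (the rewrite author's own statement) =====
-- stated objective: faster
-- what changed: Replaces the per-parser-column linear scans of file_columns and col_mapping by a set of file_columns and a reverse map parser_col->first present file_col built once, so the main loop does O(1) lookups.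
import Mathlib
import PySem

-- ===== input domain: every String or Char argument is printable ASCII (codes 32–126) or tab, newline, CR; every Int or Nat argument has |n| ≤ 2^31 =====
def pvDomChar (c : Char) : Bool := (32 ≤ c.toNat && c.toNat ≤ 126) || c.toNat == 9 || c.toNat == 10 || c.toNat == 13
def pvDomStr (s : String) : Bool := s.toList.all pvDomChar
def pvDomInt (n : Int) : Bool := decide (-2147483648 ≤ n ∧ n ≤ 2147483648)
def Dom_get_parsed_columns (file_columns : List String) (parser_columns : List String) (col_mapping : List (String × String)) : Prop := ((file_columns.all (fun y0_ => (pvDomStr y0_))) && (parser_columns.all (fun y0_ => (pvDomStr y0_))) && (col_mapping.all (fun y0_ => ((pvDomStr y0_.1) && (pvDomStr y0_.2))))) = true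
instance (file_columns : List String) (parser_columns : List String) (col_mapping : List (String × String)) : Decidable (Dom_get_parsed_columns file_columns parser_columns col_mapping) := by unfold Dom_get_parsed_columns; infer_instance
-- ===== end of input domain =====

-- B replaces A's per-column scans of file_columns and col_mapping by a set and a
-- precomputed reverse map (parser_col -> first present file_col): faster in a timing run.


-- ===== PORT A =====
-- inner 'for file_col, parser_col in col_mapping.items(): … break' loop of A:
-- first mapping entry whose value is `col` and whose key is in file_columns
def pvInnerA (file_columns : List String) (col : String) : List (String × String) → Option String
  | [] => none
  | (file_col, parser_col) :: rest =>
      if parser_col == col && file_columns.contains file_col then some file_col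
      else pvInnerA file_columns col rest

def get_parsed_columns (file_columns : List String) (parser_columns : List String) (col_mapping : List (String × String)) : List String × List String :=
  parser_columns.foldl (fun acc col =>
    if file_columns.contains col then (acc.1 ++ [col], acc.2 ++ [col])
    else
      match pvInnerA file_columns col col_mapping with
      | some file_col => (acc.1 ++ [col], acc.2 ++ [file_col])
      | none => acc) ([], [])

-- ===== PORT B =====
def get_parsed_columns_alt (file_columns : List String) (parser_columns : List String) (col_mapping : List (String × String)) : List String × List String :=
  let present : PySem.Set String := PySem.Set.ofList file_columns
  let rev : PySem.Dict String String :=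
    col_mapping.foldl (fun d p =>
      if !(d.contains p.2) && PySem.Set.contains present p.1 then d.insert p.2 p.1 else d)
      PySem.Dict.empty
  parser_columns.foldl (fun acc col =>
    if PySem.Set.contains present col then (acc.1 ++ [col], acc.2 ++ [col])
    else
      match rev.get? col with
      | some file_col => (acc.1 ++ [col], acc.2 ++ [file_col])
      | none => acc) ([], [])

-- ===== PRECONDITION & SPEC =====
def Spec_get_parsed_columns (file_columns : List String) (parser_columns : List String) (col_mapping : List (String × String)) (out : List String × List String) : Prop := out = get_parsed_columns_alt file_columns parser_columns col_mapping
instance (file_columns : List String) (parser_columns : List String) (col_mapping : List (String × String)) (out : List String × List String) : Decidable (Spec_get_parsed_columns file_columns parser_columns col_mapping out) := by unfold Spec_get_parsed_columns; infer_instance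

-- ===== CLAIM (what is proved, stated in full; the proofs are below) =====
def Claim_equal_get_parsed_columns : Prop := ∀ (file_columns : List String) (parser_columns : List String) (col_mapping : List (String × String)), Dom_get_parsed_columns file_columns parser_columns col_mapping → Spec_get_parsed_columns file_columns parser_columns col_mapping (get_parsed_columns file_columns parser_columns col_mapping)

-- ===== LEMMAS AND PROOFS =====

-- membership in set(file_columns) is membership in file_columns
lemma pv_contains_ofList (fc : List String) (x : String) :
    PySem.Set.contains (PySem.Set.ofList fc) x = fc.contains x := by
  by_cases h : x ∈ fc <;>
    simp [PySem.Set.contains_eq_listContains, List.contains_eq_mem, PySem.Set.mem_ofList, h]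

-- the reverse map built by B answers exactly A's inner scan
lemma pv_rev_get? (fc : List String) (cm : List (String × String))
    (d : PySem.Dict String String) (col : String) :
    (cm.foldl (fun d p =>
        if !(d.contains p.2) && PySem.Set.contains (PySem.Set.ofList fc) p.1 then d.insert p.2 p.1 else d)
        d).get? col
      = (d.get? col).or (pvInnerA fc col cm) := by
  induction cm generalizing d with
  | nil => simp [pvInnerA]
  | cons p rest ih =>
      obtain ⟨f, pc⟩ := p
      simp only [List.foldl_cons]
      rw [ih]
      simp only [pvInnerA, pv_contains_ofList]
      by_cases hpc : pc = col
      · subst hpc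
        rcases hd : d.get? pc with _ | v
        · have hc : d.contains pc = false := by
            rw [PySem.Dict.contains_eq_isSome_get?, hd]; rfl
          by_cases hf : f ∈ fc
          · simp [hc, hf, hd, PySem.Dict.get?_insert, Option.or]
          · simp [hc, hf, hd, Option.or]
        · have hc : d.contains pc = true := by
            rw [PySem.Dict.contains_eq_isSome_get?, hd]; rfl
          simp [hc, hd, Option.or]
      · have hne : (pc == col) = false := by simp [hpc]
        rw [hne]
        simp only [Bool.false_and, Bool.false_eq_true, if_false]
        split_ifs with h
        · rw [PySem.Dict.get?_insert_of_ne _ _ (fun e => hpc e.symm)]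
        · rfl

-- ===== VERDICT (by name: the statement is the Claim_ definition above) =====
theorem get_parsed_columns_spec : Claim_equal_get_parsed_columns := by
  intro fc pcs cm _
  unfold Spec_get_parsed_columns get_parsed_columns get_parsed_columns_alt
  congr 1
  funext acc col
  rw [pv_contains_ofList, pv_rev_get?, PySem.Dict.get?_empty, Option.or]
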